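-- pv_equiv track=rewrite | github.com/Fitzgerald-Porthmouth-Koenigsegg/Planschrift_Project | registry/Experimental/fontlink/reg_multi_sz_converter.py | encode_to_hex_string
-- ===== SOURCE A (Python) =====
-- from typing import List, Union
--
-- def encode_to_hex_string(strings: Union[List[str], str], format_style: str = "regedit") -> str:
--     """
--     将字符串列表编码为注册表 hex(7): 格式
--
--     Args:
--         strings: 要编码的字符串列表，或单个字符串
--         format_style: 格式化样式，"regedit" 或 "compact"
--
--     Returns:
--         编码后的 hex(7): 格式字符串
--
--     Raises:
--         ValueError: 当输入参数无效时
--     """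
--     if isinstance(strings, str):
--         strings = [strings]
--
--     if not strings:
--         raise ValueError("字符串列表不能为空")
--
--     combined_string = '\x00'.join(strings) + '\x00\x00'
--
--     byte_data = combined_string.encode('utf-16le')
--
--     hex_bytes = [f"{b:02x}" for b in byte_data]
--
--     if format_style == "compact":
--         return "hex(7):" + ",".join(hex_bytes)
--     elif format_style == "regedit":
--         result = "hex(7):"
--         line_length = 7
--         max_line_length = 75
--
--         for i, hex_byte in enumerate(hex_bytes):
--             if i == 0:
--                 result += hex_byte
--                 line_length += len(hex_byte)
--             else:
--                 addition = "," + hex_byte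
--                 if line_length + len(addition) > max_line_length:
--                     result += ",\\\n  " + hex_byte
--                     line_length = 2 + len(hex_byte)
--                 else:
--                     result += addition
--                     line_length += len(addition)
--
--         return result
--     else:
--         raise ValueError(f"不支持的格式样式: {format_style}")
-- ===== SOURCE B (Python) =====
-- from typing import List, Union
--
-- def encode_to_hex_string(strings: Union[List[str], str], format_style: str = "regedit") -> str:
--     if isinstance(strings, str):
--         strings = [strings]
--     if not strings:
--         raise ValueError("字符串列表不能为空")
--     byte_data = ('\x00'.join(strings) + '\x00\x00').encode('utf-16le')
--     hex_bytes = [f"{b:02x}" for b in byte_data]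
--     if format_style == "compact":
--         return "hex(7):" + ",".join(hex_bytes)
--     elif format_style == "regedit":
--         # every token is 2 chars: first line holds 23 tokens, later lines 24
--         lines = [hex_bytes[:23]]
--         rest = hex_bytes[23:]
--         while rest:
--             lines.append(rest[:24])
--             rest = rest[24:]
--         return "hex(7):" + ",\\\n  ".join(",".join(line) for line in lines)
--     else:
--         raise ValueError(f"不支持的格式样式: {format_style}")
-- ===== Notes on version B (the rewrite author's own statement) =====
-- stated objective: simpler
-- what changed: The regedit branch's incremental line_length accumulator and per-byte wrap test are replaced by closed-form fixed-width chunking: the 2-char hex tokens are split into a first line of 23 tokens and subsequent lines of 24, joined with ',' within lines and ',\\\n ' between lines.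
import Mathlib
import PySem

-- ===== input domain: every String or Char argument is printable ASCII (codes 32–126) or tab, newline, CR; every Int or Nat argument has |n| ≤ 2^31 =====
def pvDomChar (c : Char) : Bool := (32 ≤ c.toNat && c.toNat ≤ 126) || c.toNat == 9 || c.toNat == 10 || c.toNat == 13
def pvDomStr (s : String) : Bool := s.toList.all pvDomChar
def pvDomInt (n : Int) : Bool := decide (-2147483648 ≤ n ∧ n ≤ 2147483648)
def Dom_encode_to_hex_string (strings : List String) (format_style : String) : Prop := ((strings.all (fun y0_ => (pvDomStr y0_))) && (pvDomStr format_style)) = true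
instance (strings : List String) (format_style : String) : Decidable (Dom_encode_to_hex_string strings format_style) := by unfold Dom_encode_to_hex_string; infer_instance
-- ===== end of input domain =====

-- B replaces A's incremental line_length accumulator in the regedit branch by closed-form
-- fixed-width chunking (first line 23 hex tokens, later lines 24); equal on all non-raising inputs.

-- ===== PORT A =====
-- f"{b:02x}" for 0 ≤ b < 256 (exact there; every byte of the encoding is < 256)
def pvHexDigit (n : Nat) : Char := if n < 10 then Char.ofNat (48 + n) else Char.ofNat (87 + n)
def pvHex2 (b : Nat) : List Char := [pvHexDigit (b / 16), pvHexDigit (b % 16)]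
-- one char of str.encode('utf-16le'); exact for code points < 0x10000 (all of Dom)
def pvUtf16le (c : Char) : List Nat := [c.toNat % 256, c.toNat / 256]
-- combined_string = '\x00'.join(strings) + '\x00\x00'; byte_data; hex_bytes  (shared lines of A and B)
def pvHexBytes (strings : List String) : List (List Char) :=
  ((PySem.Chars.join ['\x00'] (strings.map String.toList) ++ ['\x00', '\x00']).flatMap pvUtf16le).map pvHex2

def pvHdr : List Char := ['h', 'e', 'x', '(', '7', ')', ':']

-- the body of A's regedit for-loop (state = (result, line_length), element = (i, hex_byte))
def pvStepA (st : List Char × Int) (p : Int × List Char) : List Char × Int :=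
  if p.1 = 0 then
    (st.1 ++ p.2, st.2 + (p.2.length : Int))
  else if st.2 + (1 + (p.2.length : Int)) > 75 then
    (st.1 ++ (',' :: '\\' :: '\n' :: ' ' :: ' ' :: p.2), 2 + (p.2.length : Int))
  else
    (st.1 ++ (',' :: p.2), st.2 + (1 + (p.2.length : Int)))

def encode_to_hex_string (strings : List String) (format_style : String) : String :=
  if strings = [] then ""  -- Python raises ValueError here (excluded by Pre_)
  else
    let hex_bytes := pvHexBytes strings
    if format_style = "compact" then
      String.mk (pvHdr ++ PySem.Chars.join [','] hex_bytes)
    else if format_style = "regedit" then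
      String.mk ((PySem.List.enumerate hex_bytes).foldl pvStepA (pvHdr, (7 : Int))).1
    else ""  -- Python raises ValueError here (excluded by Pre_)

-- ===== PORT B =====
-- 'while rest: lines.append(rest[:24]); rest = rest[24:]'
def pvChunks24 : List (List Char) → List (List (List Char))
  | [] => []
  | x :: xs => (x :: xs.take 23) :: pvChunks24 (xs.drop 23)
termination_by l => l.length
decreasing_by simp [List.length_drop]

def encode_to_hex_string_alt (strings : List String) (format_style : String) : String :=
  if strings = [] then ""  -- raises ValueError (excluded by Pre_)
  else
    let hex_bytes := pvHexBytes strings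
    if format_style = "compact" then
      String.mk (pvHdr ++ PySem.Chars.join [','] hex_bytes)
    else if format_style = "regedit" then
      let lines := hex_bytes.take 23 :: pvChunks24 (hex_bytes.drop 23)
      String.mk (pvHdr ++ PySem.Chars.join [',', '\\', '\n', ' ', ' ']
        (lines.map (PySem.Chars.join [','])))
    else ""  -- raises ValueError (excluded by Pre_)

-- ===== PRECONDITION & SPEC =====
-- Pre_ excludes exactly the inputs on which the Python A raises ValueError:
-- the empty string list and a format_style other than "compact"/"regedit" (B raises there too).
def Pre_encode_to_hex_string (strings : List String) (format_style : String) : Prop :=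
  strings ≠ [] ∧ (format_style = "compact" ∨ format_style = "regedit")
instance (strings : List String) (format_style : String) : Decidable (Pre_encode_to_hex_string strings format_style) := by unfold Pre_encode_to_hex_string; infer_instance

def pvWitness_encode_to_hex_string : List String × String := (["a"], "regedit")

def Spec_encode_to_hex_string (strings : List String) (format_style : String) (out : String) : Prop := out = encode_to_hex_string_alt strings format_style
instance (strings : List String) (format_style : String) (out : String) : Decidable (Spec_encode_to_hex_string strings format_style out) := by unfold Spec_encode_to_hex_string; infer_instance

-- ===== CLAIM (what is proved, stated in full; the proofs are below) =====
def Claim_equal_encode_to_hex_string : Prop := ∀ (strings : List String) (format_style : String), Dom_encode_to_hex_string strings format_style → Pre_encode_to_hex_string strings format_style → Spec_encode_to_hex_string strings format_style (encode_to_hex_string strings format_style)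

-- ===== LEMMAS AND PROOFS =====

def pvFsep : List Char := [',', '\\', '\n', ' ', ' ']

def pvCommas (l : List (List Char)) : List Char := l.flatMap (fun t => ',' :: t)

-- the tail of A's regedit output after the current line is full: wrapped lines of 24 tokens
def pvTailp : List (List Char) → List Char
  | [] => []
  | x :: xs => pvFsep ++ x ++ pvCommas (xs.take 23) ++ pvTailp (xs.drop 23)
termination_by l => l.length
decreasing_by simp [List.length_drop]

-- how many more tokens A's loop fits on the current line from line_length ll
def pvCap (ll : Int) : Nat := if ll ≤ 72 then ((72 - ll) / 3).toNat + 1 else 0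

lemma pvCap_succ (ll : Int) (h4 : 4 ≤ ll) (h72 : ll ≤ 72) : pvCap ll = pvCap (ll + 3) + 1 := by
  unfold pvCap; split_ifs <;> omega

lemma join_cons (sep : List Char) (m : List (List Char)) (a : List Char) :
    PySem.Chars.join sep (a :: m) = a ++ m.flatMap (fun c => sep ++ c) := by
  induction m generalizing a with
  | nil => simp [PySem.Chars.join, List.intercalate]
  | cons b r ih =>
    simp [PySem.Chars.join, List.intercalate] at ih ⊢
    simp [ih]

lemma chunks_nil : pvChunks24 [] = [] := by rw [pvChunks24]
lemma chunks_cons (x : List Char) (xs : List (List Char)) :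
    pvChunks24 (x :: xs) = (x :: xs.take 23) :: pvChunks24 (xs.drop 23) := by rw [pvChunks24]
lemma tailp_nil : pvTailp [] = [] := by rw [pvTailp]
lemma tailp_cons (x : List Char) (xs : List (List Char)) :
    pvTailp (x :: xs) = pvFsep ++ x ++ pvCommas (xs.take 23) ++ pvTailp (xs.drop 23) := by rw [pvTailp]

lemma tailp_eq_chunks : ∀ (n : Nat) (l : List (List Char)), l.length ≤ n →
    pvTailp l = (pvChunks24 l).flatMap (fun c => pvFsep ++ PySem.Chars.join [','] c) := by
  intro n
  induction n with
  | zero =>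
    intro l hl
    have hn : l = [] := List.eq_nil_of_length_eq_zero (by omega)
    subst hn; simp [tailp_nil, chunks_nil]
  | succ n ih =>
    intro l hl
    cases l with
    | nil => simp [tailp_nil, chunks_nil]
    | cons x xs =>
      rw [tailp_cons, chunks_cons, List.flatMap_cons,
        ih (xs.drop 23) (by simp [List.length_drop] at hl ⊢; omega), join_cons [',']]
      simp [pvCommas]

lemma enum_reduce (ts : List (List Char)) : ∀ (s : Int), 1 ≤ s → ∀ acc,
    (PySem.List.enumerate ts s).foldl pvStepA acc
      = ts.foldl (fun st t => pvStepA st (1, t)) acc := by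
  induction ts with
  | nil => intro s _ acc; simp [PySem.List.enumerate_nil]
  | cons t ts ih =>
    intro s hs acc
    rw [PySem.List.enumerate_cons, List.foldl_cons, List.foldl_cons, ih (s + 1) (by omega)]
    congr 1
    unfold pvStepA
    rw [if_neg (by omega : ¬ (s : Int) = 0), if_neg (by norm_num : ¬ (1 : Int) = 0)]

lemma foldA_eq (ts : List (List Char)) : ∀ (h2 : ∀ t ∈ ts, t.length = 2)
    (acc : List Char) (ll : Int), 4 ≤ ll → ll ≤ 75 →
    (ts.foldl (fun st t => pvStepA st (1, t)) (acc, ll)).1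
      = acc ++ pvCommas (ts.take (pvCap ll)) ++ pvTailp (ts.drop (pvCap ll)) := by
  induction ts with
  | nil =>
    intro _ acc ll _ _
    simp only [List.foldl_nil, List.take_nil, List.drop_nil, tailp_nil]
    simp [pvCommas]
  | cons t ts ih =>
    intro h2 acc ll h4 h75
    have hlen : t.length = 2 := h2 t (List.mem_cons_self ..)
    have h2' : ∀ u ∈ ts, u.length = 2 := fun u hu => h2 u (List.mem_cons_of_mem _ hu)
    rw [List.foldl_cons]
    by_cases hll : ll ≤ 72
    · have hstep : pvStepA (acc, ll) (1, t) = (acc ++ (',' :: t), ll + 3) := by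
        unfold pvStepA
        rw [if_neg (by norm_num : ¬ (1 : Int) = 0), if_neg (by rw [hlen]; push_cast; omega)]
        simp [hlen]
      rw [hstep, ih h2' _ (ll + 3) (by omega) (by omega), pvCap_succ ll h4 hll,
        List.take_succ_cons, List.drop_succ_cons]
      simp [pvCommas]
    · have hcap : pvCap ll = 0 := by unfold pvCap; rw [if_neg hll]
      have hstep : pvStepA (acc, ll) (1, t) = (acc ++ pvFsep ++ t, 4) := by
        unfold pvStepA
        rw [if_neg (by norm_num : ¬ (1 : Int) = 0), if_pos (by rw [hlen]; push_cast; omega)]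
        simp [hlen, pvFsep]
      rw [hstep, ih h2' _ 4 (by norm_num) (by norm_num)]
      have hc4 : pvCap 4 = 23 := by decide
      rw [hc4, hcap, List.take_zero, List.drop_zero, tailp_cons]
      simp [pvCommas]

lemma hexBytes_len2 (strings : List String) : ∀ t ∈ pvHexBytes strings, t.length = 2 := by
  intro t ht
  unfold pvHexBytes at ht
  obtain ⟨b, _, rfl⟩ := List.mem_map.1 ht
  rfl

lemma regedit_eq (l : List (List Char)) (h2 : ∀ t ∈ l, t.length = 2) :
    ((PySem.List.enumerate l).foldl pvStepA (pvHdr, (7 : Int))).1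
      = pvHdr ++ PySem.Chars.join [',', '\\', '\n', ' ', ' ']
          ((l.take 23 :: pvChunks24 (l.drop 23)).map (PySem.Chars.join [','])) := by
  cases l with
  | nil =>
    simp only [PySem.List.enumerate_nil, List.foldl_nil, List.take_nil, List.drop_nil,
      chunks_nil, List.map_cons, List.map_nil]
    rw [join_cons]
    simp [PySem.Chars.join, List.intercalate]
  | cons t ts =>
    have hlen : t.length = 2 := h2 t (List.mem_cons_self ..)
    have h2' : ∀ u ∈ ts, u.length = 2 := fun u hu => h2 u (List.mem_cons_of_mem _ hu)
    rw [PySem.List.enumerate_cons, List.foldl_cons]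
    have hstep : pvStepA (pvHdr, (7 : Int)) (0, t) = (pvHdr ++ t, 9) := by
      unfold pvStepA
      rw [if_pos rfl]
      simp [hlen]
    rw [hstep]
    simp only [zero_add]
    rw [enum_reduce ts 1 le_rfl, foldA_eq ts h2' _ 9 (by norm_num) (by norm_num)]
    have hc9 : pvCap 9 = 22 := by decide
    rw [hc9]
    -- RHS
    rw [show (23 : Nat) = 22 + 1 from rfl, List.take_succ_cons, List.drop_succ_cons,
      List.map_cons]
    rw [join_cons ([',', '\\', '\n', ' ', ' '] : List Char), join_cons ([','] : List Char),
      List.flatMap_map]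
    have ht := tailp_eq_chunks (ts.drop 22).length (ts.drop 22) le_rfl
    simp only [pvFsep] at ht
    rw [← ht]
    simp [pvCommas]

-- ===== VERDICT (by name: the statement is the Claim_ definition above) =====
theorem encode_to_hex_string_spec : Claim_equal_encode_to_hex_string := by
  intro strings format_style _ _
  unfold Spec_encode_to_hex_string encode_to_hex_string encode_to_hex_string_alt
  split_ifs with h1 h2 h3
  · rfl
  · rfl
  · exact congrArg String.mk (regedit_eq (pvHexBytes strings) (hexBytes_len2 strings))
  · rfl
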